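-- pv_equiv track=rewrite | github.com/VirtualMe64/leetcode-solutions | solutions/2067_maximum-number-of-points-with-cost.py | getRowOptimals
-- ===== SOURCE A (Python) =====
-- def getRowOptimals(row):
--     best = [None for _ in range(len(row))]
--
--     curr = None
--     best[0] = row[0]
--
--
--     # step 1: forward pass
--     for i, val in enumerate(row[1::]):
--         idx = i + 1
--         best[idx] = max(best[idx - 1] - 1, val)
--
--     best[-1] = max(best[-1], row[-1])
--     # step 2: backwards pass
--     for i, val in enumerate(row[::-1][1::]):
--         idx = len(row) - i - 2
--         best[idx] = max(best[idx], best[idx + 1] - 1, val)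
--
--     return best
-- ===== SOURCE B (Python) =====
-- def getRowOptimals(row):
--     # best[i] = max_j (row[j] - |i-j|) = max( max_{j<=i}(row[j]+j) - i , max_{j>=i}(row[j]-j) + i ):
--     # slope transform with two running maxima, no decay-by-1 relaxation.
--     n = len(row)
--     pre = []
--     m = row[0]
--     for j, v in enumerate(row):
--         m = max(m, v + j)
--         pre.append(m)
--     suf_rev = []
--     m = row[-1] - (n - 1)
--     j = n - 1
--     for v in reversed(row):
--         m = max(m, v - j)
--         suf_rev.append(m)
--         j -= 1
--     suf = suf_rev[::-1]
--     return [max(p - i, s + i) for i, (p, s) in enumerate(zip(pre, suf))]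
-- ===== Notes on version B (the rewrite author's own statement) =====
-- stated objective: alternative
-- what changed: B replaces A's two decay-relaxation passes (best[i]=max(best[i-1]-1,val) forward, then an in-place backward relaxation) with the slope transform: a running prefix maximum of row[j]+j and a running suffix maximum of row[j]-j, combined per index as max(pre[i]-i, suf[i]+i); no decayed array is ever built.
import Mathlib
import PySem

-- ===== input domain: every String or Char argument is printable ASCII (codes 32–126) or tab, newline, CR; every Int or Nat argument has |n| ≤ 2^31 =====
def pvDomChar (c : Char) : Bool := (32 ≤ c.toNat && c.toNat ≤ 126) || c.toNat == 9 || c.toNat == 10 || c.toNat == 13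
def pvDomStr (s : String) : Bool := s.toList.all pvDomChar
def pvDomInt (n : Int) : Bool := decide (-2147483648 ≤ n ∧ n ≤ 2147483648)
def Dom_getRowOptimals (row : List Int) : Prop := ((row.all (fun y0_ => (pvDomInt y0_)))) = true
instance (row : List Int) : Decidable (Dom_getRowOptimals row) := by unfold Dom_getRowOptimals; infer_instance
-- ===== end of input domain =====

-- B replaces A's decay-relaxation passes with the slope transform (running maxima of row[j]+j and row[j]-j); return values proved equal on nonempty rows.

-- ===== PORT A =====
-- forward-pass loop body: best[idx] = max(best[idx-1] - 1, val), idx = i + 1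
def fstep (b : List Int) (p : Int × Int) : List Int :=
  let idx : Int := p.1 + 1
  PySem.List.pySetD b idx (max (PySem.List.pyGetD b (idx - 1) 0 - 1) p.2)

-- backward-pass loop body: best[idx] = max(best[idx], best[idx+1] - 1, val), idx = len(row) - i - 2
def bstep (n : Nat) (b : List Int) (p : Int × Int) : List Int :=
  let idx : Int := (n : Int) - p.1 - 2
  PySem.List.pySetD b idx (max (max (PySem.List.pyGetD b idx 0) (PySem.List.pyGetD b (idx + 1) 0 - 1)) p.2)

-- literal port of A; the [None]*n placeholders are modelled by a dummy integer, which every read is proved to happen after an overwrite of;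
-- reading the first element of an empty row is Python's IndexError: that input is outside Pre_.
def getRowOptimals (row : List Int) : List Int :=
  let best : List Int := List.replicate row.length 0
  match PySem.List.pyGet? row 0 with
  | none => []  -- IndexError (row = []), excluded by Pre_
  | some r0 =>
    let best := PySem.List.pySetD best 0 r0
    -- step 1: forward pass over enumerate(row[1::])
    let best := (PySem.List.enumerate (PySem.List.slice row (some 1) none) 0).foldl fstep best
    -- best[-1] = max(best[-1], row[-1])
    let best := PySem.List.pySetD best (-1)
      (max (PySem.List.pyGetD best (-1) 0) (PySem.List.pyGetD row (-1) 0))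
    -- step 2: backwards pass over enumerate(row[::-1][1::]); row[::-1] is row.reverse (exact)
    let best := (PySem.List.enumerate (PySem.List.slice row.reverse (some 1) none) 0).foldl (bstep row.length) best
    best

-- ===== PORT B =====
-- 'for j, v in enumerate(row): m = max(m, v + j); pre.append(m)'
def bPre (m j : Int) : List Int → List Int
  | [] => []
  | v :: t => let m' := max m (v + j); m' :: bPre m' (j + 1) t

-- 'for v in reversed(row): m = max(m, v - j); suf_rev.append(m); j -= 1'
def bSuf (m j : Int) : List Int → List Int
  | [] => []
  | v :: t => let m' := max m (v - j); m' :: bSuf m' (j - 1) t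

-- '[max(p - i, s + i) for i, (p, s) in enumerate(zip(pre, suf))]'
def bCombine (i : Int) : List Int → List Int → List Int
  | p :: ps, s :: ss => max (p - i) (s + i) :: bCombine (i + 1) ps ss
  | _, _ => []

-- body of B for a nonempty row (pre / suf_rev / combine)
def altGo (r0 : Int) (rest : List Int) : List Int :=
  let pre := bPre r0 0 (r0 :: rest)
  match (r0 :: rest).reverse with
  | [] => []  -- unreachable
  | rl :: rr =>
    let n : Int := ((r0 :: rest).length : Int)
    let sufRev := bSuf (rl - (n - 1)) (n - 1) (rl :: rr)
    bCombine 0 pre sufRev.reverse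

def getRowOptimals_alt (row : List Int) : List Int :=
  match row with
  | [] => []  -- row[0] raises IndexError, outside Pre_
  | r0 :: rest => altGo r0 rest

-- ===== PRECONDITION & SPEC =====
-- Pre_ excludes only the empty row, on which A raises IndexError when reading the first element.
def Pre_getRowOptimals (row : List Int) : Prop := row ≠ []
instance (row : List Int) : Decidable (Pre_getRowOptimals row) := by unfold Pre_getRowOptimals; infer_instance
def pvWitness_getRowOptimals : List Int := [3, 1, 2]

def Spec_getRowOptimals (row : List Int) (out : List Int) : Prop := out = getRowOptimals_alt row
instance (row : List Int) (out : List Int) : Decidable (Spec_getRowOptimals row out) := by unfold Spec_getRowOptimals; infer_instance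

-- ===== CLAIM (what is proved, stated in full; the proofs are below) =====
def Claim_equal_getRowOptimals : Prop := ∀ (row : List Int), Dom_getRowOptimals row → Pre_getRowOptimals row → Spec_getRowOptimals row (getRowOptimals row)

-- ===== LEMMAS AND PROOFS =====

-- decay scan: pvScan a xs = [a, max(a-1,xs0), max(max(a-1,xs0)-1,xs1), …] (proof-side characterisation of A's forward pass)
def pvScan (a : Int) (xs : List Int) : List Int :=
  match xs with
  | [] => [a]
  | v :: t => a :: pvScan (max (a - 1) v) t

-- final accumulator of pvScan
def scanAcc (a : Int) (xs : List Int) : Int := xs.foldl (fun c v => max (c - 1) v) a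

-- right-to-left decay scan defined from the left (R[i] = max(R[i+1]-1, row[i]))
def pvRScan : List Int → List Int
  | [] => []
  | [x] => [x]
  | x :: y :: w => max ((pvRScan (y :: w)).headI - 1) x :: pvRScan (y :: w)

-- the suffix accumulated by A's backward pass, fed the L-prefix (reversed) and row-prefix (reversed)
def backFill : List Int → Int → List Int → List Int → List Int
  | [], m, T, _ => m :: T
  | _ :: _, m, T, [] => m :: T  -- unreachable: zs is as long as the prefix
  | a :: Qr', m, T, val :: zs' => backFill Qr' (max (max a (m - 1)) val) (m :: T) zs'

-- index-shift helpers for relating B's running maxima to the decay scans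
def addIdx (j : Int) : List Int → List Int
  | [] => []
  | x :: t => (x + j) :: addIdx (j + 1) t

def subIdx (j : Int) : List Int → List Int
  | [] => []
  | x :: t => (x - j) :: subIdx (j - 1) t

def subIdx2 (j : Int) : List Int → List Int
  | [] => []
  | x :: t => (x - j) :: subIdx2 (j + 1) t

theorem length_pvScan (a : Int) (xs : List Int) : (pvScan a xs).length = xs.length + 1 := by
  induction xs generalizing a with
  | nil => rfl
  | cons v t ih => simp [pvScan, ih]

theorem pvScan_ne_nil (a : Int) (xs : List Int) : pvScan a xs ≠ [] := by
  cases xs <;> simp [pvScan]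

theorem pvScan_append (a : Int) (u : List Int) (x : Int) :
    pvScan a (u ++ [x]) = pvScan a u ++ [max (scanAcc a u - 1) x] := by
  induction u generalizing a with
  | nil => simp [pvScan, scanAcc]
  | cons v t ih => simp [pvScan, scanAcc, ih, List.foldl_cons]

theorem getLast?_pvScan (a : Int) (u : List Int) :
    (pvScan a u).getLast? = some (scanAcc a u) := by
  induction u generalizing a with
  | nil => simp [pvScan, scanAcc]
  | cons v t ih => simp [pvScan, scanAcc, List.getLast?_cons, ih]

theorem getLast_pvScan (a : Int) (u : List Int) :
    (pvScan a u).getLast (pvScan_ne_nil a u) = scanAcc a u := by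
  have h1 : (pvScan a u).getLast? = some ((pvScan a u).getLast (pvScan_ne_nil a u)) :=
    List.getLast?_eq_some_getLast (pvScan_ne_nil a u)
  have h2 := getLast?_pvScan a u
  rw [h1] at h2; exact Option.some.inj h2

theorem headI_reverse_pvScan (a : Int) (u : List Int) :
    ((pvScan a u).reverse).headI = scanAcc a u := by
  cases hr : (pvScan a u).reverse with
  | nil => exact absurd (by simpa using congrArg List.reverse hr) (pvScan_ne_nil a u)
  | cons z zs =>
    have hz : (pvScan a u).getLast? = some z := by
      rw [← List.head?_reverse, hr]; rfl
    rw [getLast?_pvScan] at hz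
    simp [Option.some.inj hz]

-- bridge: the reversed decay scan of the reversed list is pvRScan
theorem pvRScan_of_reverse : ∀ (row : List Int) (rl : Int) (rr : List Int),
    row.reverse = rl :: rr → (pvScan rl rr).reverse = pvRScan row := by
  intro row
  induction row with
  | nil => intro rl rr h; simp at h
  | cons x w ih =>
    intro rl rr h
    cases w with
    | nil =>
      simp at h
      obtain ⟨h1, h2⟩ := h
      subst h1; subst h2; simp [pvScan, pvRScan]
    | cons y w' =>
      have hw : (y :: w').reverse ≠ [] := by simp
      obtain ⟨rl', rr', hw'⟩ := List.exists_cons_of_ne_nil hw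
      have hrow : rl :: rr = rl' :: (rr' ++ [x]) := by
        rw [← h, List.reverse_cons, hw']; rfl
      injection hrow with e1 e2
      subst e1; subst e2
      rw [pvScan_append, List.reverse_append]
      have hIH := ih rl rr' hw'
      rw [pvRScan]
      simp only [List.reverse_singleton, List.singleton_append, List.cons.injEq]
      exact ⟨by rw [← hIH, headI_reverse_pvScan], hIH⟩

theorem headI_le_pvRScan (q : List Int) (hq : q ≠ []) : q.headI ≤ (pvRScan q).headI := by
  cases q with
  | nil => exact absurd rfl hq
  | cons a t => cases t with
    | nil => simp [pvRScan]
    | cons b t' => simp [pvRScan]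

theorem pvScan_eq_cons (a : Int) (xs : List Int) : ∃ tl, pvScan a xs = a :: tl := by
  cases xs with
  | nil => exact ⟨[], rfl⟩
  | cons v t => exact ⟨pvScan (max (a - 1) v) t, rfl⟩

theorem pvRScan_eq_cons (qh : Int) (qt : List Int) :
    ∃ R', pvRScan (qh :: qt) = (pvRScan (qh :: qt)).headI :: R' := by
  cases qt with
  | nil => exact ⟨[], rfl⟩
  | cons q2 qt' => exact ⟨pvRScan (q2 :: qt'), by rw [pvRScan]; rfl⟩

-- the last row element never exceeds the forward-scan accumulator
theorem getLast_le_scanAcc : ∀ (u : List Int) (a : Int),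
    (a :: u).getLast (by simp) ≤ scanAcc a u := by
  intro u
  induction u with
  | nil => intro a; simp [scanAcc]
  | cons v t ih =>
    intro a
    have h := ih (max (a - 1) v)
    have he : (a :: v :: t).getLast (by simp) ≤ ((max (a - 1) v) :: t).getLast (by simp) := by
      cases t with
      | nil => simp [List.getLast]
      | cons b t' => exact le_of_eq rfl
    exact le_trans he (by simpa [scanAcc, List.foldl_cons] using h)

-- getD / set on explicit prefixes
theorem getD_append_mid (P : List Int) (a : Int) (t : List Int) (d : Int) :
    (P ++ a :: t).getD P.length d = a := by
  induction P with
  | nil => rfl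
  | cons p P' ih => simp

theorem set_append_mid (P : List Int) (a : Int) (t : List Int) (w : Int) :
    (P ++ a :: t).set P.length w = P ++ w :: t := by
  induction P with
  | nil => rfl
  | cons p P' ih => simp

theorem pySetD_neg_one_append (u : List Int) (x v : Int) :
    PySem.List.pySetD (u ++ [x]) (-1) v = u ++ [v] := by
  have h1 : PySem.List.pyIdx? (u ++ [x]).length (-1) = some u.length := by
    simp only [PySem.List.pyIdx?, List.length_append, List.length_cons, List.length_nil]
    norm_num
  simp only [PySem.List.pySetD, PySem.List.pySet?, h1, Option.map_some, Option.getD_some]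
  exact set_append_mid u x [] v

theorem pySetD_neg_one_getLast (l : List Int) (h : l ≠ []) :
    PySem.List.pySetD l (-1) (l.getLast h) = l := by
  induction l using List.reverseRecOn with
  | nil => exact absurd rfl h
  | append_singleton u x _ =>
    have hg : (u ++ [x]).getLast h = x := by simp
    rw [hg, pySetD_neg_one_append]

-- FORWARD PASS: A's enumerate-foldl fills the tail with the decay scan
theorem forward_pass : ∀ (xs P : List Int) (a : Int) (t : List Int), t.length = xs.length →
    (PySem.List.enumerate xs (P.length : Int)).foldl fstep (P ++ a :: t) = P ++ pvScan a xs := by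
  intro xs
  induction xs with
  | nil => intro P a t ht; simp at ht; subst ht; simp [PySem.List.enumerate_nil, pvScan]
  | cons v xs' ih =>
    intro P a t ht
    cases t with
    | nil => simp at ht
    | cons z t' =>
      rw [PySem.List.enumerate_cons, List.foldl_cons]
      have hstep : fstep (P ++ a :: z :: t') ((P.length : Int), v)
          = (P ++ [a]) ++ (max (a - 1) v) :: t' := by
        show PySem.List.pySetD (P ++ a :: z :: t')
            ((P.length : Int) + 1)
            (max (PySem.List.pyGetD (P ++ a :: z :: t') ((P.length : Int) + 1 - 1) 0 - 1) v)
          = (P ++ [a]) ++ (max (a - 1) v) :: t'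
        have h1 : ((P.length : Int) + 1 - 1) = (P.length : Int) := by ring
        rw [h1, PySem.List.pyGetD_natCast, getD_append_mid]
        have h2 : ((P.length : Int) + 1) = ((P.length + 1 : Nat) : Int) := by push_cast; ring_nf
        rw [h2, PySem.List.pySetD_natCast]
        have h3 : P.length + 1 = (P ++ [a]).length := by simp
        rw [h3, show P ++ a :: z :: t' = (P ++ [a]) ++ z :: t' by simp]
        exact set_append_mid (P ++ [a]) z t' (max (a - 1) v)
      rw [hstep]
      have hlen : ((P.length : Int) + 1) = (((P ++ [a]).length : Nat) : Int) := by simp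
      rw [hlen, ih (P ++ [a]) (max (a - 1) v) t' (by simpa using ht)]
      simp [pvScan]

-- BACKWARD PASS: A's enumerate-foldl computes backFill
theorem backward_pass : ∀ (Qr : List Int) (m : Int) (T zs : List Int), zs.length = Qr.length →
    (PySem.List.enumerate zs (T.length : Int)).foldl (bstep (Qr.length + T.length + 1)) (Qr.reverse ++ m :: T)
      = backFill Qr m T zs := by
  intro Qr
  induction Qr with
  | nil => intro m T zs hz; simp at hz; subst hz; simp [PySem.List.enumerate_nil, backFill]
  | cons a Qr' ih =>
    intro m T zs hz
    cases zs with
    | nil => simp at hz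
    | cons val zs' =>
      rw [PySem.List.enumerate_cons, List.foldl_cons]
      have hrev : (a :: Qr').reverse ++ m :: T = Qr'.reverse ++ a :: m :: T := by simp
      have hstep : bstep ((a :: Qr').length + T.length + 1) ((a :: Qr').reverse ++ m :: T) ((T.length : Int), val)
          = Qr'.reverse ++ (max (max a (m - 1)) val) :: m :: T := by
        rw [hrev]
        show PySem.List.pySetD (Qr'.reverse ++ a :: m :: T)
            ((((a :: Qr').length + T.length + 1 : Nat) : Int) - (T.length : Int) - 2)
            (max (max (PySem.List.pyGetD (Qr'.reverse ++ a :: m :: T) ((((a :: Qr').length + T.length + 1 : Nat) : Int) - (T.length : Int) - 2) 0)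
                      (PySem.List.pyGetD (Qr'.reverse ++ a :: m :: T) (((((a :: Qr').length + T.length + 1 : Nat) : Int) - (T.length : Int) - 2) + 1) 0 - 1)) val)
          = Qr'.reverse ++ (max (max a (m - 1)) val) :: m :: T
        have hidx : ((((a :: Qr').length + T.length + 1 : Nat) : Int) - (T.length : Int) - 2)
            = ((Qr'.reverse.length : Nat) : Int) := by
          simp only [List.length_cons, List.length_reverse]; push_cast; ring
        rw [hidx, PySem.List.pyGetD_natCast, getD_append_mid]
        have hidx2 : (((Qr'.reverse.length : Nat) : Int) + 1) = (((Qr'.reverse ++ [a]).length : Nat) : Int) := by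
          simp
        rw [hidx2, PySem.List.pyGetD_natCast,
            show Qr'.reverse ++ a :: m :: T = (Qr'.reverse ++ [a]) ++ m :: T by simp,
            getD_append_mid, PySem.List.pySetD_natCast,
            show (Qr'.reverse ++ [a]) ++ m :: T = Qr'.reverse ++ a :: m :: T by simp,
            set_append_mid]
      rw [hstep]
      have hstart : ((T.length : Int) + 1) = (((m :: T).length : Nat) : Int) := by simp
      have hn' : (a :: Qr').length + T.length + 1 = Qr'.length + (m :: T).length + 1 := by
        simp [List.length_cons]; omega
      rw [hstart, hn', ih (max (max a (m - 1)) val) (m :: T) zs' (by simpa using hz)]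
      rfl

-- MAIN A-side: backFill over the scan prefix equals the elementwise max of the two scans
theorem backFill_eq_zip : ∀ (pr : List Int), pr ≠ [] → ∀ (qh : Int) (qt : List Int),
    backFill (pvRScan pr)
      (List.zipWith max (pvScan (max ((pvRScan pr).headI - 1) qh) qt) (pvRScan (qh :: qt))).headI
      (List.zipWith max (pvScan (max ((pvRScan pr).headI - 1) qh) qt) (pvRScan (qh :: qt))).tail
      pr
    = List.zipWith max (pvScan ((pr.reverse ++ qh :: qt).headI) ((pr.reverse ++ qh :: qt).tail))
        (pvRScan (pr.reverse ++ qh :: qt)) := by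
  intro pr
  induction pr with
  | nil => intro h; exact absurd rfl h
  | cons x w ih =>
    intro _ qh qt
    obtain ⟨R', hRc⟩ := pvRScan_eq_cons qh qt
    set r1 : Int := (pvRScan (qh :: qt)).headI with hr1
    have hqh : qh ≤ r1 := headI_le_pvRScan (qh :: qt) (by simp)
    cases w with
    | nil =>
      obtain ⟨P', hP⟩ := pvScan_eq_cons (max (x - 1) qh) qt
      have hRx : pvRScan [x] = [x] := rfl
      have hzipS : List.zipWith max (pvScan (max ((pvRScan [x]).headI - 1) qh) qt) (pvRScan (qh :: qt))
          = (max (max (x - 1) qh) r1) :: List.zipWith max P' R' := by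
        rw [hRx, hRc]
        simp only [List.headI, hP, List.zipWith]
      rw [hzipS, hRx]
      simp only [List.headI, List.tail, backFill]
      have hrow : ([x] : List Int).reverse ++ qh :: qt = x :: qh :: qt := rfl
      rw [hrow]
      have hscan : pvScan x (qh :: qt) = x :: (max (x - 1) qh) :: P' := by
        rw [pvScan, hP]
      have hrsc : pvRScan (x :: qh :: qt) = max (r1 - 1) x :: (pvRScan (qh :: qt)) := by
        cases qt with
        | nil => rw [hr1]; rfl
        | cons q2 qt' => rw [pvRScan, hr1]
      rw [hscan, hrsc, hRc]
      simp only [List.zipWith, List.cons.injEq]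
      exact ⟨by omega, trivial⟩
    | cons y w' =>
      set A := (pvRScan (y :: w')).headI with hA
      set a := max (A - 1) x with ha
      have hpr : pvRScan (x :: y :: w') = a :: pvRScan (y :: w') := by rw [pvRScan]
      obtain ⟨P', hP⟩ := pvScan_eq_cons (max (a - 1) qh) qt
      have hzip : List.zipWith max (pvScan (max (a - 1) qh) qt) (pvRScan (qh :: qt))
          = (max (max (a - 1) qh) r1) :: List.zipWith max P' R' := by
        rw [hRc, hP]; simp [List.zipWith]
      rw [hpr]
      simp only [List.headI_cons]
      rw [hzip]
      simp only [List.headI, List.tail, backFill]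
      have hI := ih (by simp) x (qh :: qt)
      have hS' : pvScan (max ((pvRScan (y :: w')).headI - 1) x) (qh :: qt)
          = a :: pvScan (max (a - 1) qh) qt := by rw [← hA, ← ha, pvScan]
      have hR' : pvRScan (x :: qh :: qt) = max (r1 - 1) x :: pvRScan (qh :: qt) := by
        cases qt with
        | nil => rw [hr1]; rfl
        | cons q2 qt' => rw [pvRScan, hr1]
      rw [hS', hR'] at hI
      have hzip2 : List.zipWith max (a :: pvScan (max (a - 1) qh) qt) (max (r1 - 1) x :: pvRScan (qh :: qt))
          = (max a (max (r1 - 1) x)) :: List.zipWith max (pvScan (max (a - 1) qh) qt) (pvRScan (qh :: qt)) := by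
        simp [List.zipWith]
      rw [hzip2, hzip] at hI
      simp only [List.headI, List.tail] at hI
      have hhead : max (max a ((max (max (a - 1) qh) r1) - 1)) x = max a (max (r1 - 1) x) := by omega
      rw [hhead]
      have hrow : (y :: w').reverse ++ x :: qh :: qt = (x :: y :: w').reverse ++ qh :: qt := by simp
      rw [hrow] at hI
      exact hI

-- A's port on a nonempty row reduces to the backward foldl started from the decay scan
theorem portA_eval (r0 : Int) (rest : List Int) :
    getRowOptimals (r0 :: rest)
      = (PySem.List.enumerate ((r0 :: rest).reverse.tail) 0).foldl (bstep (rest.length + 1))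
          (pvScan r0 rest) := by
  have hinit : PySem.List.pySetD (List.replicate (r0 :: rest).length 0) 0 r0
      = [] ++ r0 :: List.replicate rest.length (0 : Int) := by
    have h := PySem.List.pySetD_natCast (List.replicate (r0 :: rest).length (0 : Int)) (0 : Nat) r0
    simpa [List.replicate_succ] using h
  have hslice : PySem.List.slice (r0 :: rest) (some 1) none = rest := by
    rw [PySem.List.slice_from_one]; rfl
  have hfwd := forward_pass rest [] r0 (List.replicate rest.length 0) (by simp)
  simp only [List.length_nil, Nat.cast_zero, List.nil_append] at hfwd
  have hlastS : (pvScan r0 rest).getLast (pvScan_ne_nil r0 rest) = scanAcc r0 rest :=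
    getLast_pvScan r0 rest
  have hmid : PySem.List.pySetD (pvScan r0 rest) (-1)
      (max (PySem.List.pyGetD (pvScan r0 rest) (-1) 0) (PySem.List.pyGetD (r0 :: rest) (-1) 0))
      = pvScan r0 rest := by
    rw [PySem.List.pyGetD_neg_one (pvScan r0 rest) 0 (pvScan_ne_nil r0 rest),
        PySem.List.pyGetD_neg_one (r0 :: rest) 0 (by simp)]
    have hle : (r0 :: rest).getLast (by simp) ≤ (pvScan r0 rest).getLast (pvScan_ne_nil r0 rest) := by
      rw [hlastS]; exact getLast_le_scanAcc rest r0
    rw [max_eq_left hle]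
    exact pySetD_neg_one_getLast _ (pvScan_ne_nil r0 rest)
  have hslice2 : PySem.List.slice (r0 :: rest).reverse (some 1) none = (r0 :: rest).reverse.tail := by
    rw [PySem.List.slice_from_one]
  unfold getRowOptimals
  rw [PySem.List.pyGet?_zero_cons]
  show (let best := PySem.List.pySetD (List.replicate (r0 :: rest).length 0) 0 r0
        let best := (PySem.List.enumerate (PySem.List.slice (r0 :: rest) (some 1) none) 0).foldl fstep best
        let best := PySem.List.pySetD best (-1)
          (max (PySem.List.pyGetD best (-1) 0) (PySem.List.pyGetD (r0 :: rest) (-1) 0))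
        let best := (PySem.List.enumerate (PySem.List.slice (r0 :: rest).reverse (some 1) none) 0).foldl (bstep (r0 :: rest).length) best
        best)
      = (PySem.List.enumerate ((r0 :: rest).reverse.tail) 0).foldl (bstep (rest.length + 1)) (pvScan r0 rest)
  simp only [hinit, hslice, List.nil_append]
  rw [hfwd, hmid, hslice2]
  rfl

-- A as the elementwise max of the two decay scans
theorem portA_zip (r0 : Int) (rest : List Int) :
    getRowOptimals (r0 :: rest)
      = List.zipWith max (pvScan r0 rest) (pvRScan (r0 :: rest)) := by
  rw [portA_eval]
  rcases rest.eq_nil_or_concat with hnil | ⟨u, x, hux⟩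
  · subst hnil
    simp [PySem.List.enumerate_nil, pvScan, pvRScan]
  · rw [List.concat_eq_append] at hux
    subst hux
    have hprne : ((r0 :: u).reverse : List Int) ≠ [] := by simp
    have hrevtail : (r0 :: (u ++ [x])).reverse.tail = (r0 :: u).reverse := by
      rw [show r0 :: (u ++ [x]) = (r0 :: u) ++ [x] by simp]
      simp
    have hQr : pvRScan ((r0 :: u).reverse) = (pvScan r0 u).reverse :=
      (pvRScan_of_reverse ((r0 :: u).reverse) r0 u (by simp)).symm
    have hAcc : (pvRScan ((r0 :: u).reverse)).headI = scanAcc r0 u := by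
      rw [hQr, headI_reverse_pvScan]
    set m : Int := max (scanAcc r0 u - 1) x with hm
    have hlenQr : ((r0 :: u).reverse).length = (pvRScan ((r0 :: u).reverse)).length := by
      rw [hQr]; simp [length_pvScan]
    have hbw := backward_pass (pvRScan ((r0 :: u).reverse)) m [] ((r0 :: u).reverse) hlenQr
    have hstate : (pvRScan ((r0 :: u).reverse)).reverse ++ m :: [] = pvScan r0 (u ++ [x]) := by
      rw [hQr, List.reverse_reverse, pvScan_append, hm]
    have hnval : (pvRScan ((r0 :: u).reverse)).length + ([] : List Int).length + 1 = (u ++ [x]).length + 1 := by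
      rw [← hlenQr]; simp
    rw [hstate, hnval] at hbw
    simp only [List.length_nil, Nat.cast_zero] at hbw
    rw [hrevtail, hbw]
    have hz := backFill_eq_zip ((r0 :: u).reverse) hprne x []
    have hSform : List.zipWith max (pvScan (max ((pvRScan ((r0 :: u).reverse)).headI - 1) x) [])
        (pvRScan [x]) = [max (max (scanAcc r0 u - 1) x) x] := by
      rw [hAcc]; rfl
    rw [hSform] at hz
    have hmx : max (max (scanAcc r0 u - 1) x) x = m := by rw [hm]; omega
    simp only [List.headI, List.tail] at hz
    rw [hmx] at hz
    rw [hz]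
    have hfull : ((r0 :: u).reverse).reverse ++ x :: [] = r0 :: (u ++ [x]) := by simp
    rw [hfull]

-- B-side: the forward running maximum is the index-shifted decay scan
theorem bPre_eq : ∀ (t : List Int) (a j : Int),
    bPre (a + j) (j + 1) t = addIdx (j + 1) ((pvScan a t).tail) := by
  intro t
  induction t with
  | nil => intro a j; rfl
  | cons v t' ih =>
    intro a j
    obtain ⟨tl, htl⟩ := pvScan_eq_cons (max (a - 1) v) t'
    simp only [bPre, pvScan, List.tail_cons, htl, addIdx]
    have hmx : max (a + j) (v + (j + 1)) = max (a - 1) v + (j + 1) := by omega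
    rw [hmx, ih (max (a - 1) v) (j + 1), htl, List.tail_cons]

theorem pre_eq (r0 : Int) (rest : List Int) :
    bPre r0 0 (r0 :: rest) = addIdx 0 (pvScan r0 rest) := by
  obtain ⟨tl, htl⟩ := pvScan_eq_cons r0 rest
  have h1 : bPre r0 0 (r0 :: rest)
      = (max r0 (r0 + 0)) :: bPre (max r0 (r0 + 0)) (0 + 1) rest := rfl
  have hm : max r0 (r0 + 0) = r0 + (0 : Int) := by omega
  rw [h1, hm]
  have h2 := bPre_eq rest r0 0
  rw [h2, htl]
  show (r0 + 0) :: addIdx (0 + 1) tl = (r0 + 0) :: addIdx (0 + 1) (( r0 :: tl).tail)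
  rfl

-- B-side: the backward running maximum is the index-shifted decay scan of the reversed row
theorem bSuf_eq : ∀ (t : List Int) (a j : Int),
    bSuf (a - j) (j - 1) t = subIdx (j - 1) ((pvScan a t).tail) := by
  intro t
  induction t with
  | nil => intro a j; rfl
  | cons v t' ih =>
    intro a j
    obtain ⟨tl, htl⟩ := pvScan_eq_cons (max (a - 1) v) t'
    simp only [bSuf, pvScan, List.tail_cons, htl, subIdx]
    have hmx : max (a - j) (v - (j - 1)) = max (a - 1) v - (j - 1) := by omega
    rw [hmx, ih (max (a - 1) v) (j - 1), htl, List.tail_cons]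

theorem sufRev_eq (rl : Int) (rr : List Int) (c : Int) :
    bSuf (rl - c) c (rl :: rr) = subIdx c (pvScan rl rr) := by
  obtain ⟨tl, htl⟩ := pvScan_eq_cons rl rr
  have h1 : bSuf (rl - c) c (rl :: rr)
      = (max (rl - c) (rl - c)) :: bSuf (max (rl - c) (rl - c)) (c - 1) rr := rfl
  have hm : max (rl - c) (rl - c) = rl - c := by omega
  rw [h1, hm, bSuf_eq rr rl c, htl]
  rfl

theorem subIdx2_append (u : List Int) (x : Int) : ∀ (j : Int),
    subIdx2 j (u ++ [x]) = subIdx2 j u ++ [x - (j + (u.length : Int))] := by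
  induction u with
  | nil => intro j; simp [subIdx2]
  | cons y t ih =>
    intro j
    show (y - j) :: subIdx2 (j + 1) (t ++ [x]) = (y - j) :: (subIdx2 (j + 1) t ++ [x - (j + ((t.length : Int) + 1))])
    rw [ih (j + 1)]
    have : x - (j + 1 + (t.length : Int)) = x - (j + ((t.length : Int) + 1)) := by ring_nf
    rw [this]

theorem subIdx_reverse : ∀ (S : List Int) (c : Int),
    (subIdx c S).reverse = subIdx2 (c - (S.length : Int) + 1) S.reverse := by
  intro S
  induction S with
  | nil => intro c; rfl
  | cons x t ih =>
    intro c
    simp only [subIdx, List.reverse_cons, List.length_cons]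
    push_cast
    rw [ih (c - 1)]
    have hc : c - ((t.length : Int) + 1) + 1 = c - (t.length : Int) := by ring
    have hc2 : c - 1 - (t.length : Int) + 1 = c - (t.length : Int) := by ring
    rw [hc, hc2, subIdx2_append]
    have h3 : x - (c - (t.length : Int) + ((t.reverse.length : Nat) : Int)) = x - c := by
      simp only [List.length_reverse]; ring
    rw [h3]

theorem combine_eq : ∀ (P Q : List Int) (i : Int),
    bCombine i (addIdx i P) (subIdx2 i Q) = List.zipWith max P Q := by
  intro P
  induction P with
  | nil => intro Q i; cases Q <;> rfl
  | cons p P' ih =>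
    intro Q i
    cases Q with
    | nil => rfl
    | cons q Q' =>
      simp only [addIdx, subIdx2, bCombine, List.zipWith]
      have h : max (p + i - i) (q - i + i) = max p q := by omega
      rw [h, ih Q' (i + 1)]

-- B as the elementwise max of the two decay scans
theorem portB_zip (r0 : Int) (rest : List Int) :
    getRowOptimals_alt (r0 :: rest)
      = List.zipWith max (pvScan r0 rest) (pvRScan (r0 :: rest)) := by
  have hrne : ((r0 :: rest).reverse : List Int) ≠ [] := by simp
  obtain ⟨rl, rr, hrl⟩ := List.exists_cons_of_ne_nil hrne
  show altGo r0 rest = List.zipWith max (pvScan r0 rest) (pvRScan (r0 :: rest))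
  unfold altGo
  rw [hrl]
  show bCombine 0 (bPre r0 0 (r0 :: rest))
      ((bSuf (rl - ((((r0 :: rest).length : Nat) : Int) - 1)) ((((r0 :: rest).length : Nat) : Int) - 1) (rl :: rr)).reverse)
    = List.zipWith max (pvScan r0 rest) (pvRScan (r0 :: rest))
  have hlenrr : (rr.length : Int) = (rest.length : Int) := by
    have := congrArg List.length hrl
    simp at this; omega
  have hn1 : (((r0 :: rest).length : Nat) : Int) - 1 = (rr.length : Int) := by
    simp [hlenrr]
  rw [hn1, sufRev_eq rl rr ((rr.length : Int))]
  have hSlen : ((pvScan rl rr).length : Int) = (rr.length : Int) + 1 := by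
    rw [length_pvScan]; push_cast; ring
  rw [subIdx_reverse (pvScan rl rr) ((rr.length : Int)), hSlen]
  have hzero : (rr.length : Int) - ((rr.length : Int) + 1) + 1 = 0 := by ring
  rw [hzero, pvRScan_of_reverse (r0 :: rest) rl rr hrl, pre_eq r0 rest]
  exact combine_eq (pvScan r0 rest) (pvRScan (r0 :: rest)) 0

-- ===== VERDICT (by name: the statement is the Claim_ definition above) =====
theorem getRowOptimals_spec : Claim_equal_getRowOptimals := by
  intro row _ hpre
  unfold Spec_getRowOptimals
  cases row with
  | nil => exact absurd rfl hpre
  | cons r0 rest => rw [portA_zip, portB_zip]
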